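-- pv_equiv track=rewrite | github.com/GrafKiedyOdcinek/matura-python | rozszerzone/2019maj.py | ciag
-- ===== SOURCE A (Python) =====
-- from math import gcd
--
-- def nwdlisty(a):
--     nwd = gcd(a[0], a[1])
--     for i in range(2, len(a)):
--         nwd = gcd(nwd, a[i])
--     return nwd
--
-- def ciag(c):
--     licznik = 0
--     for ii in range(0, len(c)):
--         if nwdlisty(c) == 1 and len(c) > 2:
--             c.pop(-1)
--         else:
--             licznik += 1
--     return licznik, c[0], nwdlisty(c)
-- ===== SOURCE B (Python) =====
-- from math import gcd
--
-- def ciag(c):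
--     n = len(c)
--     prefix = [0] * (n + 1)
--     g = 0
--     for i, x in enumerate(c):
--         g = gcd(g, x)
--         prefix[i + 1] = g
--     m = n
--     while m > 2 and prefix[m] == 1:
--         m -= 1
--     del c[m:]
--     return m, c[0], prefix[m]
-- ===== Notes on version B (the rewrite author's own statement) =====
-- stated objective: faster
-- what changed: B computes all prefix gcds in one pass and replaces A's per-iteration full-list gcd rescans with O(1) table lookups, deriving the pop count from the precomputed prefix-gcd array instead of re-running nwdlisty on the shrinking list each loop iteration.
import Mathlib
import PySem

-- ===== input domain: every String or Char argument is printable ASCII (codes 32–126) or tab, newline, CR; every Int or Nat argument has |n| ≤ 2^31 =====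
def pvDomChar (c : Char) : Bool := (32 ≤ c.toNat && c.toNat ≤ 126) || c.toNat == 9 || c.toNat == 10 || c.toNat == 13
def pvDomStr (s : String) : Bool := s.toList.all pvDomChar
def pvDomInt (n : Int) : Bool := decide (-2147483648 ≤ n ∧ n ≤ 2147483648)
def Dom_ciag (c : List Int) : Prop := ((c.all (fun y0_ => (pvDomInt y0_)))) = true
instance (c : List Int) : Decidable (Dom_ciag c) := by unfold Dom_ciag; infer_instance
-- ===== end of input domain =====

-- B replaces A's O(N^2) repeated full-gcd scans by a single prefix-gcd pass plus an O(1)-lookup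
-- pop simulation (asymptotically faster); both Pythons mutate c in place (A pops, B truncates) —
-- the equivalence proved here is about the RETURN value.

-- ===== PORT A =====
def pyGcd (a b : Int) : Int := (Int.gcd a b : Int)

def nwdlisty (a : List Int) : Int :=
  let nwd := pyGcd (PySem.List.pyGetD a 0 0) (PySem.List.pyGetD a 1 0)
  (PySem.List.pyRange 2 (PySem.List.len a) 1).foldl
    (fun nwd i => pyGcd nwd (PySem.List.pyGetD a i 0)) nwd

-- body of A's for-loop (the loop variable ii is unused in Python too)
def ciagStep (st : Int × List Int) : Int × List Int :=
  if nwdlisty st.2 = 1 ∧ st.2.length > 2 then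
    (st.1, ((PySem.List.pop? st.2 (-1)).getD (0, [])).2)
  else (st.1 + 1, st.2)

def ciag (c : List Int) : List Int :=
  let st := (PySem.List.pyRange 0 (PySem.List.len c) 1).foldl (fun st _ => ciagStep st) (0, c)
  [st.1, PySem.List.pyGetD st.2 0 0, nwdlisty st.2]

-- ===== PORT B =====
-- the while loop 'while m > 2 and prefix[m] == 1: m -= 1' of Source B
def shrink (pref : List Int) : Nat → Nat
  | 0 => 0
  | 1 => 1
  | 2 => 2
  | (m+3) => if pref.getD (m+3) 0 = 1 then shrink pref (m+2) else (m+3)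

def ciag_alt (c : List Int) : List Int :=
  let pref := (c.foldl (fun (acc : List Int × Int) x =>
      let g := pyGcd acc.2 x
      (acc.1 ++ [g], g)) ([0], 0)).1
  let m := shrink pref c.length
  [(m : Int), PySem.List.pyGetD c 0 0, pref.getD m 0]

-- ===== PRECONDITION & SPEC =====
-- Pre_ excludes lists of fewer than two elements, on which A raises IndexError.
def Pre_ciag (c : List Int) : Prop := 2 ≤ c.length
instance (c : List Int) : Decidable (Pre_ciag c) := by unfold Pre_ciag; infer_instance
def pvWitness_ciag : List Int := [4, 6, 3]

def Spec_ciag (c : List Int) (out : List Int) : Prop := out = ciag_alt c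
instance (c : List Int) (out : List Int) : Decidable (Spec_ciag c out) := by unfold Spec_ciag; infer_instance

-- ===== CLAIM (what is proved, stated in full; the proofs are below) =====
def Claim_equal_ciag : Prop := ∀ (c : List Int), Dom_ciag c → Pre_ciag c → Spec_ciag c (ciag c)
-- ===== LEMMAS AND PROOFS =====

-- gcd of a whole list as a single fold (the value nwdlisty computes)
def gfold (l : List Int) : Int := l.foldl pyGcd 0

theorem pyGcd_zero_left (a b : Int) : pyGcd (pyGcd 0 a) b = pyGcd a b := by
  simp [pyGcd, Int.gcd, Int.natAbs_abs]

theorem nwdlisty_eq_gfold (a : List Int) (h : 2 ≤ a.length) : nwdlisty a = gfold a := by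
  match a, h with
  | a0 :: a1 :: t, _ =>
    rw [nwdlisty, gfold]
    rw [PySem.List.foldl_pyRange_pyGetD (a0 :: a1 :: t) 0 pyGcd _ (by omega : (0:Int) ≤ 2)]
    simp [pyGcd_zero_left, PySem.List.pyGetD_zero_cons]
    simp [pysem]

-- the final length A's pop phase reaches, driven by prefix gcds (mirrors shrink, with gfold)
def mF (c : List Int) : Nat → Nat
  | 0 => 0
  | 1 => 1
  | 2 => 2
  | (k+3) => if gfold (c.take (k+3)) = 1 then mF c (k+2) else (k+3)

theorem mF_le (c : List Int) (k : Nat) : mF c k ≤ k := by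
  induction k using mF.induct c with
  | case1 => simp [mF]
  | case2 => simp [mF]
  | case3 => simp [mF]
  | case4 k h ih => rw [mF, if_pos h]; omega
  | case5 k h => rw [mF, if_neg h]

theorem mF_ge (c : List Int) (k : Nat) (h : 2 ≤ k) : 2 ≤ mF c k := by
  induction k using mF.induct c with
  | case1 => omega
  | case2 => omega
  | case3 => simp [mF]
  | case4 k hg ih => rw [mF, if_pos hg]; exact ih (by omega)
  | case5 k hg => rw [mF, if_neg hg]; omega

theorem mF_of_stop (c : List Int) (k : Nat) (h2 : 2 ≤ k)
    (h : ¬ (gfold (c.take k) = 1 ∧ k > 2)) : mF c k = k := by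
  match k, h2 with
  | 2, _ => simp [mF]
  | (k+3), _ =>
    rw [mF, if_neg]
    intro hg
    exact h ⟨hg, by omega⟩

-- repeated application of A's loop body
def iterA : Nat → Int × List Int → Int × List Int
  | 0, st => st
  | (r+1), st => iterA r (ciagStep st)

theorem foldl_ignore (L : List Int) (st : Int × List Int) :
    L.foldl (fun st _ => ciagStep st) st = iterA L.length st := by
  induction L generalizing st with
  | nil => rfl
  | cons x t ih => simp [List.foldl, iterA, ih]

theorem iterA_const (r : Nat) (ℓ : Int) (l : List Int)
    (h : ¬ (nwdlisty l = 1 ∧ l.length > 2)) : iterA r (ℓ, l) = (ℓ + r, l) := by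
  induction r generalizing ℓ with
  | zero => simp [iterA]
  | succ r ih =>
    rw [iterA, ciagStep, if_neg h, ih (ℓ + 1)]
    congr 1
    push_cast
    ring

theorem iterA_take (cs : List Int) (r k : Nat) (ℓ : Int)
    (h2 : 2 ≤ k) (hk : k ≤ cs.length) (hr : k - 2 ≤ r) :
    iterA r (ℓ, cs.take k) = (ℓ + ((r - (k - mF cs k) : Nat) : Int), cs.take (mF cs k)) := by
  induction r generalizing k ℓ with
  | zero =>
    have hk2 : k = 2 := by omega
    subst hk2
    simp [iterA, mF]
  | succ r ih =>
    have hlen : (cs.take k).length = k := by simp [hk]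
    by_cases hc : gfold (cs.take k) = 1 ∧ k > 2
    · have hnw : nwdlisty (cs.take k) = 1 := by
        rw [nwdlisty_eq_gfold _ (by omega : 2 ≤ (cs.take k).length)]; exact hc.1
      rw [iterA, ciagStep, if_pos ⟨hnw, by rw [hlen]; exact hc.2⟩]
      have hk1 : k - 1 < cs.length := by omega
      have hsplit : cs.take k = cs.take (k - 1) ++ [cs[k - 1]] := by
        have hkk : k = (k - 1) + 1 := by omega
        conv_lhs => rw [hkk]
        rw [List.take_add_one]
        simp [List.getElem?_eq_getElem hk1]
      have hmf : mF cs k = mF cs (k - 1) := by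
        match k, hc.2 with
        | (j+3), _ => rw [mF, if_pos hc.1]; rfl
      rw [hsplit, PySem.List.pop?_last]
      simp only [Option.getD_some]
      rw [ih (k - 1) ℓ (by omega) (by omega) (by omega), hmf]
      have h2m := mF_ge cs (k - 1) (by omega)
      have hle := mF_le cs (k - 1)
      congr 2
      omega
    · rw [mF_of_stop cs k h2 hc]
      have hnc : ¬ (nwdlisty (cs.take k) = 1 ∧ (cs.take k).length > 2) := by
        rw [hlen, nwdlisty_eq_gfold _ (by omega : 2 ≤ (cs.take k).length)]
        exact hc
      rw [iterA_const _ _ _ hnc]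
      simp

-- B's prefix-building fold, fully characterized
theorem pref_fold (l : List Int) (acc : List Int) (g : Int) :
    l.foldl (fun (acc : List Int × Int) x =>
      let g := pyGcd acc.2 x
      (acc.1 ++ [g], g)) (acc, g)
    = (acc ++ (List.range l.length).map (fun j => (l.take (j+1)).foldl pyGcd g),
       l.foldl pyGcd g) := by
  induction l generalizing acc g with
  | nil => simp
  | cons x t ih =>
    simp only [List.foldl_cons]
    rw [ih]
    simp only [List.length_cons, List.range_succ_eq_map, List.map_cons, List.map_map]
    congr 1
    rw [List.append_assoc]
    congr 1

-- B's prefix list is the list of prefix gcds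
theorem pref_eq (c : List Int) :
    (c.foldl (fun (acc : List Int × Int) x =>
      let g := pyGcd acc.2 x
      (acc.1 ++ [g], g)) ([0], 0)).1
    = (List.range (c.length + 1)).map (fun j => gfold (c.take j)) := by
  rw [pref_fold c [0] 0, List.range_succ_eq_map, List.map_cons]
  simp only [List.take_zero, gfold, List.foldl_nil, List.map_map]
  rfl

theorem shrink_eq_mF (c : List Int) (k : Nat) (hk : k ≤ c.length) :
    shrink ((List.range (c.length + 1)).map (fun j => gfold (c.take j))) k = mF c k := by
  induction k using mF.induct c with
  | case1 => rfl
  | case2 => rfl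
  | case3 => rfl
  | case4 k hg ih =>
    have hget : ((List.range (c.length + 1)).map (fun j => gfold (c.take j))).getD (k+3) 0
        = gfold (c.take (k+3)) := by
      have : k + 3 < c.length + 1 := by omega
      simp [List.getD, this]
    rw [shrink, mF, if_pos hg, if_pos (hget ▸ hg), ih (by omega)]
  | case5 k hg =>
    have hget : ((List.range (c.length + 1)).map (fun j => gfold (c.take j))).getD (k+3) 0
        = gfold (c.take (k+3)) := by
      have : k + 3 < c.length + 1 := by omega
      simp [List.getD, this]
    rw [shrink, mF, if_neg hg, if_neg (by rw [hget]; exact hg)]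

-- ===== VERDICT (by name: the statement is the Claim_ definition above) =====
theorem ciag_spec : Claim_equal_ciag := by
  intro c _ hpre
  have hn : 2 ≤ c.length := hpre
  unfold Spec_ciag
  simp only [ciag, ciag_alt, pref_eq]
  rw [shrink_eq_mF c c.length le_rfl]
  have hfold : (PySem.List.pyRange 0 (PySem.List.len c) 1).foldl
      (fun st _ => ciagStep st) ((0 : Int), c) = iterA c.length (0, c) := by
    rw [foldl_ignore]
    congr 1
    simp [PySem.List.length_pyRange_one]
  rw [hfold]
  have hiter := iterA_take c c.length c.length 0 hn le_rfl (by omega)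
  rw [List.take_length] at hiter
  rw [hiter]
  have hm2 : 2 ≤ mF c c.length := mF_ge c c.length hn
  have hmle : mF c c.length ≤ c.length := mF_le c c.length
  congr 1
  · simp
    omega
  congr 1
  · match c, hn with
    | x :: t, _ =>
      have htk : (x :: t).take (mF (x :: t) (x :: t).length)
          = x :: t.take (mF (x :: t) (x :: t).length - 1) := by
        conv_lhs => rw [show mF (x :: t) (x :: t).length
          = (mF (x :: t) (x :: t).length - 1) + 1 by omega]
        rfl
      rw [htk]
      simp [PySem.List.pyGetD_zero_cons]
  congr 1
  rw [nwdlisty_eq_gfold _ (by simp; omega)]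
  have : mF c c.length < c.length + 1 := by omega
  simp [List.getD, this]
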